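-- pv_equiv track=rewrite | github.com/doputer/algorithm | 백준/25644.py | dp
-- ===== SOURCE A (Python) =====
-- def dp(stock):
--   if len(stock) <= 1:
--     return 0
--
--   minimum = min(stock)
--   index = stock.index(minimum)
--
--   if index == 0:
--     return stock[-1] - stock[0]
--
--   left = dp(stock[:index])
--   right = dp(stock[index:])
--
--   return left if left > right else right
-- ===== SOURCE B (Python) =====
-- def dp(stock):
--     # One left-to-right pass: maintain the running strict minimum; each time a new
--     # strict minimum appears, close the previous segment (its best profit is
--     # previous-element minus segment minimum); finally close the last segment.
--     if len(stock) <= 1: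
--         return 0
--     best = 0
--     cm = stock[0]
--     prev = stock[0]
--     for x in stock[1:]:
--         if x < cm:
--             gain = prev - cm
--             if gain > best:
--                 best = gain
--             cm = x
--         prev = x
--     gain = prev - cm
--     return gain if gain > best else best
-- ===== Notes on version B (the rewrite author's own statement) =====
-- stated objective: faster
-- what changed: Replaced A's recursive divide-at-the-first-minimum with list slicing (worst-case quadratic) by a single left-to-right pass that maintains the running strict minimum and closes a segment (previous element minus segment minimum) each time a new strict minimum appears.
import Mathlib
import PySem

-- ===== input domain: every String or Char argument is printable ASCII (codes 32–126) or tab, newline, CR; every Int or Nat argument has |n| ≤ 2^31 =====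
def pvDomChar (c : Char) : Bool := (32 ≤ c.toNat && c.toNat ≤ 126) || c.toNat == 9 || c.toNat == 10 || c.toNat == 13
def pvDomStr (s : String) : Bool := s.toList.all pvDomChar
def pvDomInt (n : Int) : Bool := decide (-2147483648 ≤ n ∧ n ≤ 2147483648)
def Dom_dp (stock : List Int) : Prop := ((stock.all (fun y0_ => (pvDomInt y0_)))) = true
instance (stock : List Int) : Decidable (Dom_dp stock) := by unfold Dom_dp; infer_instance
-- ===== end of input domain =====

-- B replaces A's recursive divide-at-the-minimum (quadratic slicing) by a single
-- left-to-right pass maintaining the running strict minimum; objective: faster.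

-- ===== PORT A =====
def dp (stock : List Int) : Int :=
  if _h : stock.length ≤ 1 then 0
  else
    match _hm : PySem.List.min? stock (fun x => x) with
    | none => 0  -- unreachable: stock is nonempty
    | some minimum =>
      match _hi : PySem.List.index? stock minimum with
      | none => 0  -- unreachable: minimum ∈ stock
      | some index =>
        if index = 0 then
          (PySem.List.pyGet? stock (-1)).getD 0 - (PySem.List.pyGet? stock 0).getD 0
        else
          let left := dp (PySem.List.slice stock none (some (index : Int)))
          let right := dp (PySem.List.slice stock (some (index : Int)) none)
          if left > right then left else right
  termination_by stock.length
  decreasing_by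
  · obtain ⟨hk, -, -⟩ := PySem.List.getElem_of_index?_eq_some _hi
    rw [PySem.List.slice_to_natCast]
    simp [List.length_take]
    omega
  · obtain ⟨hk, -, -⟩ := PySem.List.getElem_of_index?_eq_some _hi
    rw [PySem.List.slice_from_natCast]
    simp [List.length_drop]
    omega

-- ===== PORT B =====
-- one step of B's for-loop; state = (best, cm, prev)
def dpStep (st : Int × Int × Int) (x : Int) : Int × Int × Int :=
  if x < st.2.1 then
    ((if st.2.2 - st.2.1 > st.1 then st.2.2 - st.2.1 else st.1), x, x)
  else (st.1, st.2.1, x)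

def dp_alt (stock : List Int) : Int :=
  if stock.length ≤ 1 then 0
  else
    match stock with
    | [] => 0  -- unreachable under the guard
    | h :: t =>
      let st := t.foldl dpStep (0, h, h)
      let gain := st.2.2 - st.2.1
      if gain > st.1 then gain else st.1

-- ===== PRECONDITION & SPEC =====
def Spec_dp (stock : List Int) (out : Int) : Prop := out = dp_alt stock
instance (stock : List Int) (out : Int) : Decidable (Spec_dp stock out) := by unfold Spec_dp; infer_instance

-- ===== CLAIM (what is proved, stated in full; the proofs are below) =====
def Claim_equal_dp : Prop := ∀ (stock : List Int), Dom_dp stock → Spec_dp stock (dp stock)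

-- ===== LEMMAS AND PROOFS =====

theorem ite_gt_eq_max (a b : Int) : (if a > b then a else b) = max a b := by
  split <;> omega

-- the value dp_alt computes on h :: t, without the length guard
def dpG (h : Int) (t : List Int) : Int :=
  max ((t.foldl dpStep (0, h, h)).2.2 - (t.foldl dpStep (0, h, h)).2.1)
      (t.foldl dpStep (0, h, h)).1

theorem dp_alt_cons (h : Int) (t : List Int) : dp_alt (h :: t) = dpG h t := by
  cases t with
  | nil => simp [dp_alt, dpG, List.foldl]
  | cons y ys =>
    simp only [dp_alt, dpG, List.length_cons, ite_gt_eq_max]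
    split
    · omega
    · rfl

theorem dpStep_cm (t : List Int) (b c p : Int) :
    (t.foldl dpStep (b, c, p)).2.1 = t.foldl min c := by
  induction t generalizing b c p with
  | nil => rfl
  | cons x xs ih =>
    simp only [List.foldl, dpStep]
    by_cases hx : x < c
    · rw [if_pos hx, ih, min_eq_right (le_of_lt hx)]
    · rw [if_neg hx, ih, min_eq_left (by omega)]

theorem dpStep_nochange (t : List Int) (b c p : Int) (hc : ∀ x ∈ t, ¬ x < c) :
    t.foldl dpStep (b, c, p) = (b, c, t.getLastD p) := by
  induction t generalizing p with
  | nil => rfl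
  | cons x xs ih =>
    simp only [List.foldl, dpStep, List.getLastD_cons]
    rw [if_neg (hc x (by simp))]
    exact ih _ (fun y hy => hc y (by simp [hy]))

theorem foldl_min_of_le (t : List Int) (c : Int) (h : ∀ x ∈ t, c ≤ x) :
    t.foldl min c = c := by
  induction t with
  | nil => rfl
  | cons x xs ih =>
    simp only [List.foldl]
    rw [min_eq_left (h x (by simp))]
    exact ih (fun y hy => h y (by simp [hy]))

-- B-side split: if every element of h::t1 is strictly above m and every element of
-- suf is at least m, then B's value on (h::t1) ++ m :: suf is the max of its value
-- on h::t1 and of (last - m).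
theorem dpG_split (h : Int) (t1 suf : List Int) (m : Int)
    (hpre : ∀ x ∈ h :: t1, m < x) (hsuf : ∀ x ∈ suf, m ≤ x) :
    dpG h (t1 ++ m :: suf) = max (dpG h t1) (suf.getLastD m - m) := by
  set st1 := t1.foldl dpStep (0, h, h) with hst1
  have hmc : m < st1.2.1 := by
    rw [hst1, dpStep_cm]
    rcases PySem.List.foldl_min_mem t1 h with hm | hm
    · rw [hm]; exact hpre h (by simp)
    · exact hpre _ (by simp [hm])
  unfold dpG
  rw [List.foldl_append]
  simp only [List.foldl]
  rw [show dpStep st1 m = (max (st1.2.2 - st1.2.1) st1.1, m, m) by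
        simp only [dpStep, if_pos hmc, ite_gt_eq_max]]
  rw [dpStep_nochange suf _ m m (fun x hx => by have := hsuf x hx; omega)]
  rw [← hst1]
  exact max_comm _ _

theorem dp_minhead (m : Int) (suf : List Int) (hsuf : ∀ x ∈ suf, m ≤ x) :
    dp (m :: suf) = suf.getLastD m - m := by
  rw [dp]
  by_cases h1 : (m :: suf).length ≤ 1
  · rw [dif_pos h1]
    cases suf with
    | nil => simp
    | cons a l => simp at h1
  · rw [dif_neg h1]
    rw [PySem.List.min?_id_cons, foldl_min_of_le suf m hsuf]
    split
    next heq => simp at heq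
    next minimum heq =>
      obtain rfl : m = minimum := by injection heq
      split
      next heq2 => rw [PySem.List.index?_cons_self] at heq2; simp at heq2
      next index heq2 =>
        rw [PySem.List.index?_cons_self] at heq2
        obtain rfl : 0 = index := by injection heq2
        rw [if_pos rfl]
        rw [PySem.List.pyGet?_neg_one, PySem.List.pyGet?_zero_cons]
        rw [List.getLastD_eq_getLast?]
        cases suf with
        | nil => simp at h1
        | cons a l =>
          rw [List.getLast?_cons_cons]
          have : (a :: l).getLast? = some ((a :: l).getLast (by simp)) :=
            List.getLast?_eq_some_getLast (by simp)
          rw [this]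
          rfl

theorem dp_alt_minhead (m : Int) (suf : List Int) (hsuf : ∀ x ∈ suf, m ≤ x) :
    dp_alt (m :: suf) = suf.getLastD m - m := by
  rw [dp_alt_cons]
  unfold dpG
  rw [dpStep_nochange suf 0 m m (fun x hx => by have := hsuf x hx; omega)]
  have hmem : suf.getLastD m ∈ m :: suf := by
    cases suf with
    | nil => simp
    | cons a l =>
      rw [List.getLastD_cons]
      have := List.getLast_mem (l := a :: l) (by simp)
      rw [List.getLast_eq_getLastD] at this
      exact List.mem_cons_of_mem _ this
  have : m ≤ suf.getLastD m := by
    rcases List.mem_cons.1 hmem with h | h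
    · omega
    · exact hsuf _ h
  simp only []
  omega

theorem main_dp_eq_aux (n : Nat) : ∀ (s : List Int), s.length ≤ n → dp s = dp_alt s := by
  induction n with
  | zero =>
    intro s hs
    have : s = [] := List.eq_nil_of_length_eq_zero (by omega)
    subst this
    rw [dp, dp_alt]; rfl
  | succ n ih =>
    intro s hs
    by_cases h1 : s.length ≤ 1
    · rw [dp, dif_pos h1]
      unfold dp_alt
      rw [if_pos h1]
    · cases s with
      | nil => simp at h1
      | cons h t =>
        have hmemmin : List.foldl min h t ∈ h :: t := by
          rcases PySem.List.foldl_min_mem t h with hm | hm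
          · rw [hm]; simp
          · simp [hm]
        have hmin : ∀ y ∈ h :: t, List.foldl min h t ≤ y := by
          intro y hy
          rcases List.mem_cons.1 hy with rfl | hy
          · exact (PySem.List.foldl_min_le t y).1
          · exact (PySem.List.foldl_min_le t h).2 y hy
        have hsome : ∃ i, PySem.List.index? (h :: t) (List.foldl min h t) = some i := by
          rcases Option.isSome_iff_exists.1 ((PySem.List.index?_isSome_iff _ _).2 hmemmin) with ⟨i, hi⟩
          exact ⟨i, hi⟩
        obtain ⟨i, hi⟩ := hsome
        obtain ⟨pre, suf, hdecomp, hlen, hnot⟩ := (PySem.List.index?_eq_some_iff _ _ _).1 hi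
        set m := List.foldl min h t with hm
        have hsuf : ∀ x ∈ suf, m ≤ x := by
          intro x hx
          exact hmin x (by rw [hdecomp]; exact List.mem_append_right _ (by simp [hx]))
        cases pre with
        | nil =>
          have hs' : h :: t = m :: suf := by simpa using hdecomp
          rw [hs', dp_minhead m suf hsuf, dp_alt_minhead m suf hsuf]
        | cons h' t1 =>
          have hh : h' = h := by
            have := congrArg (fun l => l.head?) hdecomp
            simpa using this.symm
          subst hh
          have hpre : ∀ x ∈ h' :: t1, m < x := by
            intro x hx
            have hle : m ≤ x := hmin x (by rw [hdecomp]; exact List.mem_append_left _ hx)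
            have hne : x ≠ m := fun he => hnot (he ▸ hx)
            omega
          have ht : t = t1 ++ m :: suf := by
            have := congrArg (fun l => l.tail) hdecomp
            simpa using this
          -- unfold A
          rw [dp, dif_neg h1]
          rw [PySem.List.min?_id_cons, ← hm]
          have hi0 : i ≠ 0 := by
            intro he; rw [he] at hlen; simp at hlen
          rw [show (match _hm : some m with
              | none => (0 : Int)
              | some minimum =>
                match _hi : PySem.List.index? (h' :: t) minimum with
                | none => 0
                | some index =>
                  if index = 0 then (PySem.List.pyGet? (h' :: t) (-1)).getD 0 - (PySem.List.pyGet? (h' :: t) 0).getD 0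
                  else
                    have left := dp (PySem.List.slice (h' :: t) none (some (index : Int)));
                    have right := dp (PySem.List.slice (h' :: t) (some (index : Int)) none);
                    if left > right then left else right)
              = (if (dp (PySem.List.slice (h' :: t) none (some (i : Int)))) > (dp (PySem.List.slice (h' :: t) (some (i : Int)) none)) then (dp (PySem.List.slice (h' :: t) none (some (i : Int)))) else (dp (PySem.List.slice (h' :: t) (some (i : Int)) none))) from by
            split
            next heq => simp at heq
            next minimum heq =>
              obtain rfl : m = minimum := by injection heq
              split
              next heq2 => rw [hi] at heq2; simp at heq2
              next index heq2 =>
                rw [hi] at heq2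
                obtain rfl : i = index := by injection heq2
                rw [if_neg hi0]]
          have hileft : PySem.List.slice (h' :: t) none (some (i : Int)) = h' :: t1 := by
            rw [PySem.List.slice_to_natCast, ← hlen, hdecomp, List.take_left]
          have hiright : PySem.List.slice (h' :: t) (some (i : Int)) none = m :: suf := by
            rw [PySem.List.slice_from_natCast, ← hlen, hdecomp, List.drop_left]
          rw [hileft, hiright]
          have hprelen : (h' :: t1).length ≤ n := by
            have : (h' :: t).length = (h' :: t1).length + (m :: suf).length := by
              rw [ht]; simp; omega
            simp at hs ⊢
            simp at this
            omega
          rw [ih _ hprelen, dp_minhead m suf hsuf]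
          rw [ite_gt_eq_max]
          -- unfold B
          rw [ht, dp_alt_cons h' t1, dp_alt_cons h' (t1 ++ m :: suf), dpG_split h' t1 suf m hpre hsuf]

theorem main_dp_eq (s : List Int) : dp s = dp_alt s :=
  main_dp_eq_aux s.length s le_rfl

-- ===== VERDICT (by name: the statement is the Claim_ definition above) =====
theorem dp_spec : Claim_equal_dp := by
  intro stock _
  unfold Spec_dp
  exact main_dp_eq stock
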